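-- pv_equiv track=rewrite | github.com/zemanntru/Project-Euler | p90-cube-digit-pairs.py | GenCubSet
-- ===== SOURCE A (Python) =====
-- ord = [(0, 4), (0, 6), (1, 6), (1, 8), (2, 5), (3, 6), (4, 6)]
--
-- def GenCubSet(st1, st2, dep):
--
--     rtup = []
--     cs1a, cs1b = st1.copy(), st1.copy()
--     cs2a, cs2b = st2.copy(), st2.copy()
--
--     if st1.count(ord[dep][0]) == 0:
--         cs1a.append(ord[dep][0])
--
--     if st2.count(ord[dep][0]) == 0:
--         cs2a.append(ord[dep][0])
--
--     if st1.count(ord[dep][1]) == 0: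
--         cs1b.append(ord[dep][1])
--
--     if st2.count(ord[dep][1]) == 0:
--         cs2b.append(ord[dep][1])
--
--     if max(len(cs1a), len(cs2b)) <= 6:
--         rtup.append((cs1a, cs2b)) if dep == len(ord) - 1 else \
--             rtup.extend(GenCubSet(cs1a, cs2b, dep + 1))
--
--     if (cs1a != cs1b or cs2b != cs2a) and max(len(cs1b), len(cs2a)) <= 6:
--         rtup.append((cs1b, cs2a)) if dep == len(ord) - 1 else \
--             rtup.extend(GenCubSet(cs1b, cs2a, dep + 1))
--
--     return rtup
-- ===== SOURCE B (Python) =====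
-- ORD = [(0, 4), (0, 6), (1, 6), (1, 8), (2, 5), (3, 6), (4, 6)]
--
-- def GenCubSet(st1, st2, dep):
--     # Breadth-first: keep the frontier of partial (cube1, cube2) states and
--     # advance it one ord-level at a time; leaves keep A's left-to-right order.
--     frontier = [(list(st1), list(st2))]
--     for d in range(dep, len(ORD)):
--         x, y = ORD[d]
--         nxt = []
--         for s1, s2 in frontier:
--             a1 = s1 if x in s1 else s1 + [x]
--             b1 = s1 if y in s1 else s1 + [y]
--             a2 = s2 if x in s2 else s2 + [x]
--             b2 = s2 if y in s2 else s2 + [y]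
--             if max(len(a1), len(b2)) <= 6:
--                 nxt.append((a1, b2))
--             if (a1 != b1 or b2 != a2) and max(len(b1), len(a2)) <= 6:
--                 nxt.append((b1, a2))
--         frontier = nxt
--     return frontier
-- ===== Notes on version B (the rewrite author's own statement) =====
-- stated objective: alternative
-- what changed: Replaces A's binary recursion over face choices with an iterative breadth-first pass: a frontier of partial (cube1, cube2) states is advanced one ord-level at a time, expanding each state into its up-to-two successors; leaves come out in A's exact left-to-right order.
import Mathlib
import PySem

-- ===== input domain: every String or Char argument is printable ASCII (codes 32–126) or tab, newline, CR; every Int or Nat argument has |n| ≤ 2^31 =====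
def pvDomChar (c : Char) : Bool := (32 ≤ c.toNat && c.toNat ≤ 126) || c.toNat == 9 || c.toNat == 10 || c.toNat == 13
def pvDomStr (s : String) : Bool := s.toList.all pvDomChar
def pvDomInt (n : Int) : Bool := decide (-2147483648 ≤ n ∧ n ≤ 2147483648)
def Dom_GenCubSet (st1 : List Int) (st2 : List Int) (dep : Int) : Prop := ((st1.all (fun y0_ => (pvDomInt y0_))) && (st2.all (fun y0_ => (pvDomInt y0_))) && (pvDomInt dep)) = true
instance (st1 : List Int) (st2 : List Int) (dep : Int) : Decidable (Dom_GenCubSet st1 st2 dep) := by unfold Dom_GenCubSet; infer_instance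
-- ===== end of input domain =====

-- B replaces A's binary recursion by a breadth-first frontier fold over the ord levels (same return value; A mutates nothing observable).
-- ===== PORT A =====
-- ord = [(0,4),(0,6),(1,6),(1,8),(2,5),(3,6),(4,6)]
def pyOrd : List (Int × Int) := [(0, 4), (0, 6), (1, 6), (1, 8), (2, 5), (3, 6), (4, 6)]

def GenCubSet (st1 : List Int) (st2 : List Int) (dep : Int) : List (List Int × List Int) :=
  match h : PySem.List.pyGet? pyOrd dep with
  | none => []   -- Python raises IndexError on ord[dep] here; excluded by Pre_
  | some od =>
    let cs1a := if PySem.List.count st1 od.1 = 0 then st1 ++ [od.1] else st1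
    let cs2a := if PySem.List.count st2 od.1 = 0 then st2 ++ [od.1] else st2
    let cs1b := if PySem.List.count st1 od.2 = 0 then st1 ++ [od.2] else st1
    let cs2b := if PySem.List.count st2 od.2 = 0 then st2 ++ [od.2] else st2
    let r1 : List (List Int × List Int) :=
      if max cs1a.length cs2b.length ≤ 6 then
        (if _hd : dep = (pyOrd.length : Int) - 1 then [(cs1a, cs2b)]
         else GenCubSet cs1a cs2b (dep + 1))
      else []
    let r2 : List (List Int × List Int) :=
      if (cs1a ≠ cs1b ∨ cs2b ≠ cs2a) ∧ max cs1b.length cs2a.length ≤ 6 then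
        (if _hd : dep = (pyOrd.length : Int) - 1 then [(cs1b, cs2a)]
         else GenCubSet cs1b cs2a (dep + 1))
      else []
    r1 ++ r2
termination_by (7 - dep).toNat
decreasing_by
  all_goals
    { have hr : ¬ (PySem.List.pyGet? pyOrd dep = none) := by simp [h]
      rw [PySem.List.pyGet?_eq_none_iff] at hr
      unfold PySem.Raise.InRange at hr
      simp only [pyOrd, List.length] at hr _hd
      omega }

-- ===== PORT B =====
-- one ord level: expand every frontier pair into its (up to two) successor pairs
def altStep (frontier : List (List Int × List Int)) (d : Int) : List (List Int × List Int) :=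
  match PySem.List.pyGet? pyOrd d with
  | none => []   -- Python raises IndexError on ORD[d] here; excluded by Pre_
  | some od =>
    frontier.foldl
      (fun nxt p =>
        let a1 := if od.1 ∈ p.1 then p.1 else p.1 ++ [od.1]
        let b1 := if od.2 ∈ p.1 then p.1 else p.1 ++ [od.2]
        let a2 := if od.1 ∈ p.2 then p.2 else p.2 ++ [od.1]
        let b2 := if od.2 ∈ p.2 then p.2 else p.2 ++ [od.2]
        (nxt ++ (if max a1.length b2.length ≤ 6 then [(a1, b2)] else []))
            ++ (if (a1 ≠ b1 ∨ b2 ≠ a2) ∧ max b1.length a2.length ≤ 6 then [(b1, a2)] else []))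
      []

def GenCubSet_alt (st1 : List Int) (st2 : List Int) (dep : Int) : List (List Int × List Int) :=
  (PySem.List.pyRange dep (pyOrd.length : Int) 1).foldl altStep [(st1, st2)]

-- ===== PRECONDITION & SPEC =====
-- Pre_: exactly the dep for which Python's ord[dep] indexing never raises (A raises IndexError otherwise).
def Pre_GenCubSet (st1 : List Int) (st2 : List Int) (dep : Int) : Prop := -7 ≤ dep ∧ dep ≤ 6
instance (st1 : List Int) (st2 : List Int) (dep : Int) : Decidable (Pre_GenCubSet st1 st2 dep) := by unfold Pre_GenCubSet; infer_instance
def pvWitness_GenCubSet : List Int × List Int × Int := ([0, 4], [6], 2)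

def Spec_GenCubSet (st1 : List Int) (st2 : List Int) (dep : Int) (out : List (List Int × List Int)) : Prop := out = GenCubSet_alt st1 st2 dep
instance (st1 : List Int) (st2 : List Int) (dep : Int) (out : List (List Int × List Int)) : Decidable (Spec_GenCubSet st1 st2 dep out) := by unfold Spec_GenCubSet; infer_instance

-- ===== CLAIM (what is proved, stated in full; the proofs are below) =====
def Claim_equal_GenCubSet : Prop := ∀ (st1 : List Int) (st2 : List Int) (dep : Int), Dom_GenCubSet st1 st2 dep → Pre_GenCubSet st1 st2 dep → Spec_GenCubSet st1 st2 dep (GenCubSet st1 st2 dep)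

-- ===== LEMMAS AND PROOFS =====
-- the (up to two) successor pairs of a partial state at an ord level (x, y)
def kids (x y : Int) (p : List Int × List Int) : List (List Int × List Int) :=
  let a1 := if x ∈ p.1 then p.1 else p.1 ++ [x]
  let b1 := if y ∈ p.1 then p.1 else p.1 ++ [y]
  let a2 := if x ∈ p.2 then p.2 else p.2 ++ [x]
  let b2 := if y ∈ p.2 then p.2 else p.2 ++ [y]
  (if max a1.length b2.length ≤ 6 then [(a1, b2)] else [])
    ++ (if (a1 ≠ b1 ∨ b2 ≠ a2) ∧ max b1.length a2.length ≤ 6 then [(b1, a2)] else [])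

lemma count_if_eq_mem_if (l : List Int) (x : Int) :
    (if PySem.List.count l x = 0 then l ++ [x] else l) = (if x ∈ l then l else l ++ [x]) := by
  by_cases h : x ∈ l <;>
    simp [PySem.List.count_eq, List.count_eq_zero, h]

lemma pyOrd_isSome (d : Int) (h1 : -7 ≤ d) (h2 : d < 7) :
    ∃ od, PySem.List.pyGet? pyOrd d = some od := by
  cases h : PySem.List.pyGet? pyOrd d with
  | none =>
      rw [PySem.List.pyGet?_eq_none_iff] at h
      exact absurd (by unfold PySem.Raise.InRange; simp [pyOrd]; omega) h
  | some od => exact ⟨od, rfl⟩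

lemma altStep_eq_flatMap (d : Int) (od : Int × Int)
    (h : PySem.List.pyGet? pyOrd d = some od) (f : List (List Int × List Int)) :
    altStep f d = f.flatMap (kids od.1 od.2) := by
  unfold altStep
  rw [h]
  suffices hgen : ∀ (f acc : List (List Int × List Int)),
      f.foldl (fun nxt p =>
        let a1 := if od.1 ∈ p.1 then p.1 else p.1 ++ [od.1]
        let b1 := if od.2 ∈ p.1 then p.1 else p.1 ++ [od.2]
        let a2 := if od.1 ∈ p.2 then p.2 else p.2 ++ [od.1]
        let b2 := if od.2 ∈ p.2 then p.2 else p.2 ++ [od.2]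
        (nxt ++ (if max a1.length b2.length ≤ 6 then [(a1, b2)] else []))
            ++ (if (a1 ≠ b1 ∨ b2 ≠ a2) ∧ max b1.length a2.length ≤ 6 then [(b1, a2)] else []))
        acc = acc ++ f.flatMap (kids od.1 od.2) by
    simpa using hgen f []
  intro f
  induction f with
  | nil => simp
  | cons p t ih =>
      intro acc
      rw [List.foldl_cons, ih]
      simp only [kids, List.flatMap_cons, List.append_assoc]

lemma genA_leaf (s1 s2 : List Int) : GenCubSet s1 s2 6 = kids 4 6 (s1, s2) := by
  rw [GenCubSet]
  have h : PySem.List.pyGet? pyOrd 6 = some (4, 6) := by decide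
  have hd : (6 : Int) = (pyOrd.length : Int) - 1 := by decide
  rw [h]
  simp only [count_if_eq_mem_if, kids, dif_pos hd]

lemma genA_step (d : Int) (od : Int × Int)
    (h : PySem.List.pyGet? pyOrd d = some od) (hd : d ≠ 6) (s1 s2 : List Int) :
    GenCubSet s1 s2 d = (kids od.1 od.2 (s1, s2)).flatMap (fun p => GenCubSet p.1 p.2 (d + 1)) := by
  rw [GenCubSet]
  rw [h]
  have hd' : ¬ d = (pyOrd.length : Int) - 1 := by simp [pyOrd]; omega
  simp only [count_if_eq_mem_if, kids, dif_neg hd']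
  split_ifs <;> simp

lemma frontier_invariant : ∀ (k : Nat), k ≤ 13 → ∀ (d : Int), d = 6 - (k : Int) →
    ∀ (f : List (List Int × List Int)),
      (PySem.List.pyRange d 7 1).foldl altStep f = f.flatMap (fun p => GenCubSet p.1 p.2 d) := by
  intro k
  induction k with
  | zero =>
      intro _ d hd f
      have hd6 : d = 6 := by omega
      subst hd6
      rw [PySem.List.pyRange_one_cons (by omega), PySem.List.pyRange_one_eq_nil (by omega)]
      rw [List.foldl_cons, List.foldl_nil,
        altStep_eq_flatMap 6 (4, 6) (by decide) f]
      simp only [genA_leaf]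
  | succ k ih =>
      intro hk d hd f
      obtain ⟨od, hod⟩ := pyOrd_isSome d (by omega) (by omega)
      rw [PySem.List.pyRange_one_cons (by omega), List.foldl_cons,
        altStep_eq_flatMap d od hod f,
        ih (by omega) (d + 1) (by omega), List.flatMap_assoc]
      exact (List.flatMap_congr (fun p _ => (genA_step d od hod (by omega) p.1 p.2).symm))

-- ===== VERDICT (by name: the statement is the Claim_ definition above) =====
theorem GenCubSet_spec : Claim_equal_GenCubSet := by
  intro st1 st2 dep _ hpre
  unfold Spec_GenCubSet GenCubSet_alt
  obtain ⟨h1, h2⟩ := hpre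
  have h7 : (pyOrd.length : Int) = 7 := by decide
  rw [h7, frontier_invariant (6 - dep).toNat (by omega) dep (by omega) [(st1, st2)]]
  simp
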